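-- pv_equiv track=rewrite | github.com/shinkeonkim/boj-solution-archiving-site | data/source/26512_70939256.py | f
-- ===== SOURCE A (Python) =====
-- def f(x):
--   l = []
--   while x > 0:
--     l.append(x % 2)
--     x //= 2
--
--   while len(l) < 8:
--     l.append(0)
--
--   return l
-- ===== SOURCE B (Python) =====
-- # table-driven: emit 8 bits per byte chunk from a precomputed table, then trim
-- _BITS = [[(b >> i) & 1 for i in range(8)] for b in range(256)]
--
-- def f(x):
--     out = []
--     while x > 0:
--         out += _BITS[x & 255]
--         x >>= 8
--     if not out:
--         return [0] * 8
--     while len(out) > 8 and out[-1] == 0: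
--         out.pop()
--     return out
-- ===== Notes on version B (the rewrite author's own statement) =====
-- stated objective: alternative
-- what changed: B consumes x a byte at a time, expanding each low byte into 8 bits via a precomputed 256-entry table, then trims trailing zeros back down to 8 while A generates one bit per division step and pads up to 8.
import Mathlib
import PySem

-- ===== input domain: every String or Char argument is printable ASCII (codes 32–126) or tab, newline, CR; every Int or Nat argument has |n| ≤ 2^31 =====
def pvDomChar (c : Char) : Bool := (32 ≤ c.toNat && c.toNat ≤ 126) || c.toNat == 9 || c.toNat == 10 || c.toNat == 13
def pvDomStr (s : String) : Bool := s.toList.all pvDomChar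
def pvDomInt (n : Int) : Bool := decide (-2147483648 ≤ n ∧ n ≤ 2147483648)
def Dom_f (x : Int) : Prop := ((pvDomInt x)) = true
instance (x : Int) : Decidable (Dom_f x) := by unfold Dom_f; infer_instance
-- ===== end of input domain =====

-- B replaces A's bit-at-a-time divide loop plus zero padding by a table-driven byte-chunk
-- expansion followed by trimming trailing zeros back to eight (alternative algorithm, same cost).

-- ===== PORT A =====
-- first while loop: collect x % 2 and halve x while x > 0
def fLoop (x : Int) : List Int :=
  if _h : x > 0 then PySem.Int.mod x 2 :: fLoop (PySem.Int.floordiv x 2) else []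
termination_by x.toNat
decreasing_by
  have hlt : PySem.Int.floordiv x 2 < x := (PySem.Int.floordiv_lt_iff_lt_mul (by omega)).mpr (by omega)
  have hge0 : (0:Int) ≤ PySem.Int.floordiv x 2 := (PySem.Int.le_floordiv_iff_mul_le (by omega)).mpr (by omega)
  omega

-- second while loop: append 0 while len < 8
def fPad (l : List Int) : List Int :=
  if l.length < 8 then fPad (l ++ [0]) else l
termination_by 8 - l.length
decreasing_by simp; omega

def f (x : Int) : List Int := fPad (fLoop x)

-- ===== PORT B =====
-- _BITS = [[(b >> i) & 1 for i in range(8)] for b in range(256)]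
def pvBITS : List (List Int) :=
  (List.range 256).map (fun b => (List.range 8).map (fun i => (((b >>> i) &&& 1 : Nat) : Int)))

-- byte loop: out += _BITS[x & 255]; x >>= 8, while x > 0.
-- Under the loop guard x > 0, Python's 'x & 255' is exactly x % 256 and 'x >> 8' is
-- exactly x // 256 (both exact for nonnegative ints); the table index is in range [0,256).
def bLoop (x : Int) : List Int :=
  if _h : x > 0 then
    pvBITS.getD (PySem.Int.mod x 256).toNat [] ++ bLoop (PySem.Int.floordiv x 256)
  else []
termination_by x.toNat
decreasing_by
  have hlt : PySem.Int.floordiv x 256 < x := (PySem.Int.floordiv_lt_iff_lt_mul (by omega)).mpr (by omega)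
  have hge0 : (0:Int) ≤ PySem.Int.floordiv x 256 := (PySem.Int.le_floordiv_iff_mul_le (by omega)).mpr (by omega)
  omega

-- trim loop: while len(out) > 8 and out[-1] == 0: out.pop()
def bTrim (l : List Int) : List Int :=
  if 8 < l.length ∧ l.getLast? = some 0 then bTrim l.dropLast else l
termination_by l.length
decreasing_by
  rename_i h
  have := h.1
  simp [List.length_dropLast]; omega

def f_alt (x : Int) : List Int :=
  let out := bLoop x
  if out.isEmpty then List.replicate 8 0 else bTrim out

-- ===== PRECONDITION & SPEC =====
def Spec_f (x : Int) (out : List Int) : Prop := out = f_alt x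
instance (x : Int) (out : List Int) : Decidable (Spec_f x out) := by unfold Spec_f; infer_instance

-- ===== CLAIM (what is proved, stated in full; the proofs are below) =====
def Claim_equal_f : Prop := ∀ (x : Int), Dom_f x → Spec_f x (f x)

-- ===== LEMMAS AND PROOFS =====

-- bit i of x, as both programs compute it
def pvBit (x : Int) (i : Nat) : Int := PySem.Int.mod (PySem.Int.floordiv x (2 ^ i)) 2

lemma pvBit_succ (x : Int) (hxpos : 0 < x) (i : Nat) :
    pvBit x (i + 1) = pvBit (PySem.Int.floordiv x 2) i := by
  have h2 : PySem.Int.floordiv x 2 = x / 2 := PySem.Int.floordiv_eq_ediv_of_pos (by omega)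
  unfold pvBit
  rw [h2, PySem.Int.floordiv_eq_ediv_of_pos (show (0:Int) < 2^(i+1) by positivity),
      PySem.Int.floordiv_eq_ediv_of_pos (show (0:Int) < 2^i by positivity)]
  rw [show ((2:Int)^(i+1)) = 2 * 2^i by ring, ← Int.ediv_ediv_of_nonneg (by omega)]

lemma pvBit_high (x : Int) (hx : 0 < x) {i : Nat} (hi : PySem.Int.bitLength x ≤ i) :
    pvBit x i = 0 := by
  have h1 : x.natAbs < 2 ^ PySem.Int.bitLength x := PySem.Int.lt_two_pow_bitLength x
  have h2 : (2:Nat) ^ PySem.Int.bitLength x ≤ 2 ^ i := Nat.pow_le_pow_right (by omega) hi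
  have hxlt : x < 2 ^ i := by
    have h3 : (x.natAbs : Int) < 2 ^ i := by exact_mod_cast lt_of_lt_of_le h1 h2
    omega
  unfold pvBit
  rw [PySem.Int.floordiv_eq_ediv_of_pos (by positivity)]
  rw [Int.ediv_eq_zero_of_lt (by omega) hxlt]
  simp [PySem.Int.mod]

-- top bit of a positive number is 1
lemma pvBit_top (x : Int) (hx : 0 < x) :
    pvBit x (PySem.Int.bitLength x - 1) = 1 := by
  have h1 : x.natAbs < 2 ^ PySem.Int.bitLength x := PySem.Int.lt_two_pow_bitLength x
  have h2 : (2:Nat) ^ (PySem.Int.bitLength x - 1) ≤ x.natAbs :=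
    PySem.Int.two_pow_bitLength_le x (by omega)
  have hb1 : 1 ≤ PySem.Int.bitLength x := by
    by_contra h
    have h0 : PySem.Int.bitLength x = 0 := by omega
    rw [h0] at h1; simp at h1; omega
  have habs : (x.natAbs : Int) = x := Int.natAbs_of_nonneg (by omega)
  have hlo : (2:Int) ^ (PySem.Int.bitLength x - 1) ≤ x := by
    have hc := (Nat.cast_le (α := Int)).mpr h2
    rw [habs] at hc
    push_cast at hc
    exact hc
  have hhi : x < 2 * 2 ^ (PySem.Int.bitLength x - 1) := by
    have hc := (Nat.cast_lt (α := Int)).mpr h1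
    rw [habs] at hc
    push_cast at hc
    have he : (2:Int) ^ PySem.Int.bitLength x = 2 * 2 ^ (PySem.Int.bitLength x - 1) := by
      rw [← pow_succ']
      congr 1; omega
    rw [he] at hc
    exact hc
  have hp : (0:Int) < 2 ^ (PySem.Int.bitLength x - 1) := by positivity
  have hq1 : 1 ≤ PySem.Int.floordiv x (2 ^ (PySem.Int.bitLength x - 1)) :=
    (PySem.Int.le_floordiv_iff_mul_le hp).mpr (by omega)
  have hq2 : PySem.Int.floordiv x (2 ^ (PySem.Int.bitLength x - 1)) < 2 :=
    (PySem.Int.floordiv_lt_iff_lt_mul hp).mpr (by omega)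
  unfold pvBit
  have hq : PySem.Int.floordiv x (2 ^ (PySem.Int.bitLength x - 1)) = 1 := by omega
  rw [hq]
  decide

-- converse of lt_two_pow_bitLength
lemma bitLength_le_of_lt (x : Int) (m : Nat) (h : x.natAbs < 2 ^ m) :
    PySem.Int.bitLength x ≤ m := by
  by_cases hx0 : x = 0
  · subst hx0; simp [PySem.Int.bitLength_zero]
  by_contra hc
  have h2 : (2:Nat) ^ (PySem.Int.bitLength x - 1) ≤ x.natAbs :=
    PySem.Int.two_pow_bitLength_le x hx0
  have : (2:Nat) ^ m ≤ 2 ^ (PySem.Int.bitLength x - 1) :=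
    Nat.pow_le_pow_right (by omega) (by omega)
  omega

-- ---- A-side characterisation ----

lemma fLoop_eq (x : Int) (hx : 0 ≤ x) :
    fLoop x = (List.range (PySem.Int.bitLength x)).map (pvBit x) := by
  by_cases h : 0 < x
  · have hnn : (0:Int) ≤ PySem.Int.floordiv x 2 := (PySem.Int.le_floordiv_iff_mul_le (by omega)).mpr (by omega)
    have ih := fLoop_eq (PySem.Int.floordiv x 2) hnn
    rw [fLoop, dif_pos h, ih, PySem.Int.bitLength_of_pos h, List.range_succ_eq_map]
    simp only [List.map_cons, List.map_map]
    congr 1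
    · unfold pvBit
      rw [pow_zero, PySem.Int.floordiv_eq_ediv_of_pos (by omega), Int.ediv_one]
    · apply List.map_congr_left
      intro i _
      simp only [Function.comp_apply]
      exact (pvBit_succ x h i).symm
  · have hx0 : x = 0 := by omega
    subst hx0
    rw [fLoop]
    simp [PySem.Int.bitLength_zero]
termination_by x.toNat
decreasing_by
  have hlt : PySem.Int.floordiv x 2 < x := (PySem.Int.floordiv_lt_iff_lt_mul (by omega)).mpr (by omega)
  have hge0 : (0:Int) ≤ PySem.Int.floordiv x 2 := (PySem.Int.le_floordiv_iff_mul_le (by omega)).mpr (by omega)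
  omega

lemma fPad_eq (l : List Int) : fPad l = l ++ List.replicate (8 - l.length) 0 := by
  by_cases h : l.length < 8
  · have ih := fPad_eq (l ++ [0])
    rw [fPad, if_pos h, ih]
    simp only [List.append_assoc, List.length_append, List.length_cons, List.length_nil]
    congr 1
    have h8 : 8 - l.length = (8 - (l.length + 1)) + 1 := by omega
    rw [h8, List.replicate_succ]
    simp
  · rw [fPad, if_neg h]
    have : 8 - l.length = 0 := by omega
    simp [this]
termination_by 8 - l.length
decreasing_by simp; omega

lemma fLoop_nonpos (x : Int) (h : ¬ 0 < x) : fLoop x = [] := by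
  rw [fLoop, dif_neg h]

-- f on positives equals the canonical indexed bit list of length max(bitLength, 8)
lemma f_pos_eq (x : Int) (hx : 0 < x) :
    f x = (List.range (max (PySem.Int.bitLength x) 8)).map (pvBit x) := by
  unfold f
  rw [fLoop_eq x (by omega), fPad_eq]
  simp only [List.length_map, List.length_range]
  set b := PySem.Int.bitLength x with hb
  by_cases hge : 8 ≤ b
  · have hmax : max b 8 = b := by omega
    have : 8 - b = 0 := by omega
    simp [hmax, this]
  · have hmax : max b 8 = 8 := by omega
    have h8 : 8 = b + (8 - b) := by omega
    rw [hmax, h8, List.range_add, List.map_append]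
    congr 1
    symm
    rw [List.eq_replicate_iff]
    refine ⟨by simp, ?_⟩
    intro y hy
    rw [List.mem_map] at hy
    obtain ⟨i, hi1, rfl⟩ := hy
    rw [List.mem_map] at hi1
    obtain ⟨k, _, rfl⟩ := hi1
    exact pvBit_high x hx (Nat.le_add_right b k)

-- ---- B-side characterisation ----

-- the table entry for the low byte of a positive x lists bits 0..7 of x
lemma pvBITS_low (x : Int) (hx : 0 < x) :
    pvBITS.getD (PySem.Int.mod x 256).toNat [] = (List.range 8).map (pvBit x) := by
  have hm : PySem.Int.mod x 256 = x % 256 := PySem.Int.mod_eq_emod_of_pos (by omega)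
  have hr0 : (0:Int) ≤ x % 256 := Int.emod_nonneg x (by omega)
  have hr1 : x % 256 < 256 := Int.emod_lt_of_pos x (by omega)
  have hidx : (PySem.Int.mod x 256).toNat < 256 := by omega
  unfold pvBITS
  rw [List.getD_eq_getElem?_getD]
  rw [List.getElem?_map, List.getElem?_range hidx]
  simp only [Option.map_some, Option.getD_some]
  apply List.map_congr_left
  intro i hi
  rw [List.mem_range] at hi
  rw [hm]
  have hcast : (((x % 256).toNat : Nat) : Int) = x % 256 := by omega
  unfold pvBit
  rw [PySem.Int.floordiv_eq_ediv_of_pos (show (0:Int) < 2 ^ i by positivity),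
      PySem.Int.mod_eq_emod_of_pos (show (0:Int) < 2 by omega)]
  rw [Nat.shiftRight_eq_div_pow, Nat.and_one_is_mod]
  have hcs : (((x % 256).toNat / 2 ^ i % 2 : Nat) : Int)
       = (((x % 256).toNat : Nat) : Int) / 2 ^ i % 2 := by
    push_cast; rfl
  rw [hcs, hcast]
  -- (x % 256) / 2^i % 2 = x / 2^i % 2 for i < 8: decide per i, omega per literal power
  interval_cases i <;> omega

lemma pvBit_shift8 (x : Int) (hx : 0 < x) (i : Nat) :
    pvBit (PySem.Int.floordiv x 256) i = pvBit x (i + 8) := by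
  have h2 : PySem.Int.floordiv x 256 = x / 256 := PySem.Int.floordiv_eq_ediv_of_pos (by omega)
  unfold pvBit
  rw [h2, PySem.Int.floordiv_eq_ediv_of_pos (show (0:Int) < 2^(i+8) by positivity),
      PySem.Int.floordiv_eq_ediv_of_pos (show (0:Int) < 2^i by positivity)]
  rw [Int.ediv_ediv_of_nonneg (by omega)]
  rw [show (256 * (2:Int)^i) = 2^(i+8) by ring]

-- bLoop produces whole byte chunks: bits 0..8k-1 for some k covering bitLength x
lemma bLoop_eq (x : Int) (hx : 0 ≤ x) :
    ∃ k : Nat, bLoop x = (List.range (8 * k)).map (pvBit x)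
      ∧ PySem.Int.bitLength x ≤ 8 * k ∧ (0 < x → 1 ≤ k) := by
  by_cases h : 0 < x
  · have hnn : (0:Int) ≤ PySem.Int.floordiv x 256 :=
      (PySem.Int.le_floordiv_iff_mul_le (by omega)).mpr (by omega)
    obtain ⟨k, hk1, hk2, _⟩ := bLoop_eq (PySem.Int.floordiv x 256) hnn
    refine ⟨k + 1, ?_, ?_, fun _ => by omega⟩
    · rw [bLoop, dif_pos h, hk1, pvBITS_low x h]
      have hrw : 8 * (k + 1) = 8 + 8 * k := by ring
      rw [hrw, List.range_add, List.map_append]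
      congr 1
      rw [List.map_map]
      apply List.map_congr_left
      intro i _
      simp only [Function.comp_apply]
      rw [pvBit_shift8 x h i, Nat.add_comm]
    · -- x < 256 * 2^(8k) hence bitLength x ≤ 8(k+1)
      have hq : PySem.Int.floordiv x 256 = x / 256 := PySem.Int.floordiv_eq_ediv_of_pos (by omega)
      have hlt : (PySem.Int.floordiv x 256).natAbs < 2 ^ (8 * k) := by
        calc (PySem.Int.floordiv x 256).natAbs
            < 2 ^ PySem.Int.bitLength (PySem.Int.floordiv x 256) :=
              PySem.Int.lt_two_pow_bitLength _
          _ ≤ 2 ^ (8 * k) := Nat.pow_le_pow_right (by omega) hk2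
      have habs : ((PySem.Int.floordiv x 256).natAbs : Int) = PySem.Int.floordiv x 256 :=
        Int.natAbs_of_nonneg hnn
      have h1 : x / 256 < (2:Int) ^ (8 * k) := by
        have hc := (Nat.cast_lt (α := Int)).mpr hlt
        rw [habs, hq] at hc
        push_cast at hc
        exact hc
      have hx2 : x < 256 * 2 ^ (8 * k) := by
        have hm1 := Int.emod_lt_of_pos x (show (0:Int) < 256 by omega)
        have hm2 := Int.emod_nonneg x (show (256:Int) ≠ 0 by omega)
        have hdm := Int.mul_ediv_add_emod x 256
        nlinarith [h1]
      apply bitLength_le_of_lt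
      have hxa : (x.natAbs : Int) = x := Int.natAbs_of_nonneg (by omega)
      have hpow : (((2:Nat) ^ (8 * (k + 1)) : Nat) : Int) = 256 * 2 ^ (8 * k) := by
        push_cast
        rw [show 8 * (k + 1) = 8 + 8 * k by ring, pow_add]
        norm_num
      have hfin : (x.natAbs : Int) < (((2:Nat) ^ (8 * (k + 1)) : Nat) : Int) := by
        rw [hxa, hpow]; exact hx2
      exact_mod_cast hfin
  · refine ⟨0, ?_, ?_, by omega⟩
    · rw [bLoop, dif_neg h]; simp
    · have : x = 0 := by omega
      simp [this, PySem.Int.bitLength_zero]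
termination_by x.toNat
decreasing_by
  have hlt : PySem.Int.floordiv x 256 < x := (PySem.Int.floordiv_lt_iff_lt_mul (by omega)).mpr (by omega)
  have hge0 : (0:Int) ≤ PySem.Int.floordiv x 256 := (PySem.Int.le_floordiv_iff_mul_le (by omega)).mpr (by omega)
  omega

lemma getLast?_range_map (g : Nat → Int) (n : Nat) (hn : 0 < n) :
    ((List.range n).map g).getLast? = some (g (n - 1)) := by
  rw [List.getLast?_eq_getElem?]
  simp only [List.length_map, List.length_range]
  rw [List.getElem?_map, List.getElem?_range (by omega)]
  rfl

-- trimming the padded bit list down to max(bitLength, 8)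
lemma bTrim_eq (x : Int) (hx : 0 < x) (n : Nat)
    (hn : max (PySem.Int.bitLength x) 8 ≤ n) :
    bTrim ((List.range n).map (pvBit x))
      = (List.range (max (PySem.Int.bitLength x) 8)).map (pvBit x) := by
  set b := PySem.Int.bitLength x with hb
  by_cases hgt : max b 8 < n
  · have hlast : ((List.range n).map (pvBit x)).getLast? = some (pvBit x (n - 1)) :=
      getLast?_range_map _ n (by omega)
    have hz : pvBit x (n - 1) = 0 := pvBit_high x hx (by omega)
    rw [bTrim, if_pos ⟨by simp; omega, by rw [hlast, hz]⟩]
    have hdrop : ((List.range n).map (pvBit x)).dropLast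
        = (List.range (n - 1)).map (pvBit x) := by
      have hns : n = (n - 1) + 1 := by omega
      rw [hns, List.range_succ, List.map_append]
      simp
    rw [hdrop]
    exact bTrim_eq x hx (n - 1) (by omega)
  · have hn' : n = max b 8 := by omega
    subst hn'
    rw [bTrim, if_neg]
    rintro ⟨h1, h2⟩
    simp only [List.length_map, List.length_range] at h1
    -- then max b 8 = b > 8 and the last element is the top bit, which is 1
    have hlast : ((List.range (max b 8)).map (pvBit x)).getLast? = some (pvBit x (max b 8 - 1)) :=
      getLast?_range_map _ _ (by omega)
    have hmb : max b 8 = b := by omega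
    rw [hlast, hmb] at h2
    rw [pvBit_top x hx] at h2
    exact absurd h2 (by simp)
termination_by n
decreasing_by omega

-- ===== VERDICT (by name: the statement is the Claim_ definition above) =====
theorem f_spec : Claim_equal_f := by
  intro x _
  unfold Spec_f f_alt
  by_cases hx : 0 < x
  · obtain ⟨k, hk1, hk2, hk3⟩ := bLoop_eq x (by omega)
    have hk1' := hk3 hx
    simp only [hk1]
    rw [if_neg (by simp [List.isEmpty_iff]; omega)]
    rw [bTrim_eq x hx (8 * k) (by omega)]
    exact f_pos_eq x hx
  · rw [bLoop, dif_neg hx]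
    simp only [List.isEmpty_nil, if_pos]
    unfold f
    rw [fLoop_nonpos x hx, fPad_eq]
    simp
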